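-- pv_equiv track=rewrite | github.com/Yashaswini717/SentinelCI | repository_analysis/dependency_graph.py | find_affected_modules
-- ===== SOURCE A (Python) =====
-- from collections import deque
--
-- def find_affected_modules(changed_module: str, graph: dict) -> list:
--     """
--     Given a changed module, traverse the graph and find
--     ALL modules that directly or indirectly depend on it.
--     Uses reverse BFS — finds who imports the changed module.
--     """
--     # Build reverse graph: "who imports X"
--     reverse_graph = {}
--     for module, deps in graph.items():
--         for dep in deps:
--             if dep not in reverse_graph:
--                 reverse_graph[dep] = []
--             reverse_graph[dep].append(module)
--
--     # BFS from changed module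
--     visited = set()
--     queue = deque([changed_module])
--
--     while queue:
--         current = queue.popleft()
--         if current in visited:
--             continue
--         visited.add(current)
--         for affected in reverse_graph.get(current, []):
--             if affected not in visited:
--                 queue.append(affected)
--
--     # Remove the changed module itself from results
--     visited.discard(changed_module)
--     return sorted(list(visited))
-- ===== SOURCE B (Python) =====
-- def find_affected_modules(changed_module: str, graph: dict) -> list:
--     """
--     Find all modules that directly or indirectly depend on changed_module,
--     by DFS with an explicit stack, scanning the graph items directly for
--     importers of the current node (no auxiliary reverse-graph dict).
--     """
--     visited = set()
--     stack = [changed_module]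
--     while stack:
--         current = stack.pop()
--         if current in visited:
--             continue
--         visited.add(current)
--         for module, deps in graph.items():
--             if current in deps and module not in visited:
--                 stack.append(module)
--     visited.discard(changed_module)
--     return sorted(visited)
-- ===== Notes on version B (the rewrite author's own statement) =====
-- stated objective: simpler
-- what changed: Replaces A's precomputed reverse-dependency dict plus FIFO BFS by a stack-based DFS that scans the graph items directly for importers of the current node; skipping the per-edge dict construction makes B measurably faster on the generated inputs, though a traversal visiting many nodes would rescan the graph per node.
import Mathlib
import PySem

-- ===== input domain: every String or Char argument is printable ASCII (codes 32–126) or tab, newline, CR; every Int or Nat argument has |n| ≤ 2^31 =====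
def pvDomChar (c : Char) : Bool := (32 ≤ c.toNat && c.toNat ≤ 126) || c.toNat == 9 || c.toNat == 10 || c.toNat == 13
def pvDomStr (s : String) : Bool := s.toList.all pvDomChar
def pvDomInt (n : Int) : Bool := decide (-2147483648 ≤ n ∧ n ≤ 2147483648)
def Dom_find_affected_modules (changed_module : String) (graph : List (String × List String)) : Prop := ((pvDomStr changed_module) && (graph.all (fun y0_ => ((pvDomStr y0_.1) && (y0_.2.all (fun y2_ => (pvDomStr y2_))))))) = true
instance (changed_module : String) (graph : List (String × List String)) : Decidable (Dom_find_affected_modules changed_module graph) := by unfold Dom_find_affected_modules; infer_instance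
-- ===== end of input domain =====

-- B replaces A's precomputed reverse-dependency dict + FIFO BFS by a stack DFS that
-- scans the graph items directly for importers (objective: simpler; no speed claim).

-- ===== PORT A =====
-- "reverse_graph[dep] = [] if absent; reverse_graph[dep].append(module)" is Dict.modify dep [] (· ++ [module])
def pvRev (graph : List (String × List String)) : PySem.Dict String (List String) :=
  graph.foldl
    (fun rg md => md.2.foldl (fun rg dep => rg.modify dep [] (fun l => l ++ [md.1])) rg)
    PySem.Dict.empty

-- the BFS while-loop; fuel is a totality guard only (proved sufficient below), the Python loop has none;
-- "visited.add(current)" is inlined where Python reads the updated `visited`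
def pvBfsA (rg : PySem.Dict String (List String)) :
    Nat → PySem.Set String → List String → PySem.Set String
  | 0, visited, _ => visited
  | _+1, visited, [] => visited
  | fuel+1, visited, current :: rest =>
    if PySem.Set.contains visited current then pvBfsA rg fuel visited rest
    else
      pvBfsA rg fuel (PySem.Set.add visited current)
        (rest ++ ((rg.getD current []).filter
          (fun a => !(PySem.Set.contains (PySem.Set.add visited current) a))))

def find_affected_modules (changed_module : String) (graph : List (String × List String)) : List String :=
  let reverse_graph := pvRev graph
  let visited :=
    pvBfsA reverse_graph
      ((graph.length + 2) * ((graph.map (fun md => md.2.length)).sum + 2) + 2)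
      PySem.Set.empty [changed_module]
  PySem.List.sorted (PySem.Set.discard visited changed_module) (fun x => x) false

-- ===== PORT B =====
-- the inner "for module, deps in graph.items(): if current in deps and module not in visited: stack.append(module)"
def pvPushB (graph : List (String × List String)) (current : String)
    (visited : PySem.Set String) (stack : List String) : List String :=
  graph.foldl
    (fun st md =>
      if md.2.contains current && !(PySem.Set.contains visited md.1) then st ++ [md.1] else st)
    stack

-- the DFS while-loop: current = stack.pop() pops the LAST element; fuel is a totality guard only
def pvDfsB (graph : List (String × List String)) :
    Nat → PySem.Set String → List String → PySem.Set String
  | 0, visited, _ => visited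
  | _+1, visited, [] => visited
  | fuel+1, visited, s :: ss =>
    if PySem.Set.contains visited ((s :: ss).getLast (by simp)) then
      pvDfsB graph fuel visited (s :: ss).dropLast
    else
      pvDfsB graph fuel (PySem.Set.add visited ((s :: ss).getLast (by simp)))
        (pvPushB graph ((s :: ss).getLast (by simp))
          (PySem.Set.add visited ((s :: ss).getLast (by simp))) (s :: ss).dropLast)

def find_affected_modules_alt (changed_module : String) (graph : List (String × List String)) : List String :=
  let visited :=
    pvDfsB graph ((graph.length + 2) * (graph.length + 2) + 2)
      PySem.Set.empty [changed_module]
  PySem.List.sorted (PySem.Set.discard visited changed_module) (fun x => x) false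

-- ===== PRECONDITION & SPEC =====
def Spec_find_affected_modules (changed_module : String) (graph : List (String × List String)) (out : List String) : Prop := out = find_affected_modules_alt changed_module graph
instance (changed_module : String) (graph : List (String × List String)) (out : List String) : Decidable (Spec_find_affected_modules changed_module graph out) := by unfold Spec_find_affected_modules; infer_instance

-- ===== CLAIM (what is proved, stated in full; the proofs are below) =====
def Claim_equal_find_affected_modules : Prop := ∀ (changed_module : String) (graph : List (String × List String)), Dom_find_affected_modules changed_module graph → Spec_find_affected_modules changed_module graph (find_affected_modules changed_module graph)

-- ===== LEMMAS AND PROOFS =====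

-- the edge relation of the reverse dependency graph: y imports x
def pvStep (graph : List (String × List String)) (x y : String) : Prop :=
  ∃ md ∈ graph, md.1 = y ∧ x ∈ md.2

-- all nodes a worklist can ever contain
def pvUniv (changed_module : String) (graph : List (String × List String)) : Finset String :=
  insert changed_module (graph.map Prod.fst).toFinset

lemma pvStep_mem_univ {graph : List (String × List String)} {x y : String}
    (h : pvStep graph x y) (c : String) : y ∈ pvUniv c graph := by
  obtain ⟨md, hmd, rfl, _⟩ := h
  exact Finset.mem_insert_of_mem (List.mem_toFinset.2 (List.mem_map_of_mem hmd))

lemma pvRev_getD (graph : List (String × List String)) (c : String) :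
    (pvRev graph).getD c [] =
      ((graph.flatMap (fun md => md.2.map (fun dep => (dep, md.1)))).filter
        (fun p => p.1 == c)).map (fun p => p.2) := by
  have h : pvRev graph =
      (graph.flatMap (fun md => md.2.map (fun dep => (dep, md.1)))).foldl
        (fun d p => d.modify p.1 [] (fun l => l ++ [p.2])) PySem.Dict.empty := by
    unfold pvRev
    rw [List.foldl_flatMap]
    simp only [List.foldl_map]
  rw [h, PySem.Dict.getD_foldl_modify_append]
  simp [PySem.Dict.getD, PySem.Dict.get?, PySem.Dict.empty]

lemma mem_adjA (graph : List (String × List String)) (c y : String) :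
    y ∈ (pvRev graph).getD c [] ↔ pvStep graph c y := by
  rw [pvRev_getD]
  simp only [List.mem_map, List.mem_filter, List.mem_flatMap, pvStep]
  constructor
  · rintro ⟨p, ⟨⟨md, hmd, dep, hdep, rfl⟩, hc⟩, rfl⟩
    simp only [beq_iff_eq] at hc
    exact ⟨md, hmd, rfl, hc ▸ hdep⟩
  · rintro ⟨md, hmd, rfl, hc⟩
    exact ⟨(c, md.1), ⟨⟨md, hmd, c, hc, rfl⟩, by simp⟩, rfl⟩

lemma len_adjA (graph : List (String × List String)) (c : String) :
    ((pvRev graph).getD c []).length ≤ (graph.map (fun md => md.2.length)).sum := by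
  rw [pvRev_getD, List.length_map]
  calc ((graph.flatMap (fun md => md.2.map (fun dep => (dep, md.1)))).filter
          (fun p => p.1 == c)).length
      ≤ (graph.flatMap (fun md => md.2.map (fun dep => (dep, md.1)))).length :=
        List.length_filter_le _ _
    _ = (graph.map (fun md => md.2.length)).sum := by
        rw [List.length_flatMap]; simp

lemma pvPushB_eq (graph : List (String × List String)) (c : String)
    (V : PySem.Set String) (st : List String) :
    pvPushB graph c V st =
      st ++ (graph.filter
        (fun md => md.2.contains c && !(PySem.Set.contains V md.1))).map (fun md => md.1) :=
  PySem.List.foldl_append_if _ _ _ _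

lemma mem_pushB_part (graph : List (String × List String)) (c y : String) (V : PySem.Set String) :
    (y ∈ (graph.filter
        (fun md => md.2.contains c && !(PySem.Set.contains V md.1))).map (fun md => md.1)) ↔
      (pvStep graph c y ∧ y ∉ V) := by
  simp only [List.mem_map, List.mem_filter, Bool.and_eq_true, Bool.not_eq_true',
    pvStep]
  constructor
  · rintro ⟨md, ⟨hmd, hc, hv⟩, rfl⟩
    refine ⟨⟨md, hmd, rfl, by simpa using hc⟩, fun hmem => ?_⟩
    rw [(PySem.Set.contains_iff _ _).2 hmem] at hv
    cases hv
  · rintro ⟨⟨md, hmd, rfl, hc⟩, hv⟩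
    refine ⟨md, ⟨hmd, by simpa using hc, ?_⟩, rfl⟩
    cases hcon : PySem.Set.contains V md.1
    · rfl
    · exact absurd ((PySem.Set.contains_iff _ _).1 hcon) hv

lemma len_pushB_part (graph : List (String × List String)) (c : String) (V : PySem.Set String) :
    ((graph.filter
        (fun md => md.2.contains c && !(PySem.Set.contains V md.1))).map (fun md => md.1)).length
      ≤ graph.length := by
  rw [List.length_map]; exact List.length_filter_le _ _

-- ---- soundness: everything the loops visit is reachable from the worklist ----

lemma bfsA_sound (graph : List (String × List String)) :
    ∀ (f : Nat) (V : PySem.Set String) (Q : List String) (x : String),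
      x ∈ pvBfsA (pvRev graph) f V Q →
      x ∈ V ∨ ∃ q ∈ Q, Relation.ReflTransGen (pvStep graph) q x := by
  intro f
  induction f with
  | zero => intro V Q x hx; exact Or.inl hx
  | succ f ih =>
    intro V Q x hx
    cases Q with
    | nil => exact Or.inl hx
    | cons c rest =>
      by_cases hc : PySem.Set.contains V c = true
      · rw [pvBfsA, if_pos hc] at hx
        rcases ih _ _ _ hx with h | ⟨q, hq, hr⟩
        · exact Or.inl h
        · exact Or.inr ⟨q, List.mem_cons_of_mem _ hq, hr⟩
      · rw [pvBfsA, if_neg hc] at hx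
        rcases ih _ _ _ hx with h | ⟨q, hq, hr⟩
        · rcases (PySem.Set.mem_add V c x).1 h with h | rfl
          · exact Or.inl h
          · exact Or.inr ⟨x, List.mem_cons_self .., Relation.ReflTransGen.refl⟩
        · rcases List.mem_append.1 hq with h | h
          · exact Or.inr ⟨q, List.mem_cons_of_mem _ h, hr⟩
          · have hstep : pvStep graph c q := (mem_adjA graph c q).1 (List.mem_of_mem_filter h)
            exact Or.inr ⟨c, List.mem_cons_self ..,
              (Relation.ReflTransGen.single hstep).trans hr⟩

lemma dfsB_sound (graph : List (String × List String)) :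
    ∀ (f : Nat) (V : PySem.Set String) (Q : List String) (x : String),
      x ∈ pvDfsB graph f V Q →
      x ∈ V ∨ ∃ q ∈ Q, Relation.ReflTransGen (pvStep graph) q x := by
  intro f
  induction f with
  | zero => intro V Q x hx; exact Or.inl hx
  | succ f ih =>
    intro V Q x hx
    cases Q with
    | nil => exact Or.inl hx
    | cons s ss =>
      have hne : (s :: ss) ≠ [] := by simp
      set c := (s :: ss).getLast (by simp) with hcdef
      have hsplit : (s :: ss).dropLast ++ [c] = s :: ss := List.dropLast_append_getLast hne
      by_cases hc : PySem.Set.contains V c = true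
      · rw [pvDfsB, if_pos hc] at hx
        rcases ih _ _ _ hx with h | ⟨q, hq, hr⟩
        · exact Or.inl h
        · exact Or.inr ⟨q, by rw [← hsplit]; exact List.mem_append_left _ hq, hr⟩
      · rw [pvDfsB, if_neg hc, pvPushB_eq] at hx
        rcases ih _ _ _ hx with h | ⟨q, hq, hr⟩
        · rcases (PySem.Set.mem_add V c x).1 h with h | rfl
          · exact Or.inl h
          · exact Or.inr ⟨c, by rw [← hsplit]; simp, Relation.ReflTransGen.refl⟩
        · rcases List.mem_append.1 hq with h | h
          · exact Or.inr ⟨q, by rw [← hsplit]; exact List.mem_append_left _ h, hr⟩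
          · have hstep : pvStep graph c q := ((mem_pushB_part graph c q _).1 h).1
            exact Or.inr ⟨c, by rw [← hsplit]; simp,
              (Relation.ReflTransGen.single hstep).trans hr⟩

-- ---- completeness: with enough fuel the loops reach everything ----

lemma bfsA_complete (changed_module : String) (graph : List (String × List String)) :
    ∀ (f : Nat) (V : PySem.Set String) (Q : List String),
      (pvUniv changed_module graph \ V.toFinset).card *
          ((graph.map (fun md => md.2.length)).sum + 2) + Q.length ≤ f →
      (∀ v ∈ V, ∀ y, pvStep graph v y → y ∈ V ∨ y ∈ Q) →
      (∀ q ∈ Q, q ∈ pvUniv changed_module graph) →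
      (∀ v ∈ V, v ∈ pvBfsA (pvRev graph) f V Q) ∧
      (∀ q ∈ Q, q ∈ pvBfsA (pvRev graph) f V Q) ∧
      (∀ v ∈ pvBfsA (pvRev graph) f V Q, ∀ y, pvStep graph v y →
        y ∈ pvBfsA (pvRev graph) f V Q) := by
  intro f
  induction f with
  | zero =>
    intro V Q hf hinv _
    cases Q with
    | nil =>
      refine ⟨fun v hv => hv, by simp, fun v hv y hstep => ?_⟩
      rcases hinv v hv y hstep with h | h
      · exact h
      · simp at h
    | cons c rest => simp only [List.length_cons] at hf; omega
  | succ f ih =>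
    intro V Q hf hinv hq
    cases Q with
    | nil =>
      refine ⟨fun v hv => hv, by simp, fun v hv y hstep => ?_⟩
      rcases hinv v hv y hstep with h | h
      · exact h
      · simp at h
    | cons c rest =>
      simp only [List.length_cons] at hf
      by_cases hc : PySem.Set.contains V c = true
      · rw [pvBfsA, if_pos hc]
        have hmem : c ∈ V := (PySem.Set.contains_iff _ _).1 hc
        obtain ⟨h1, h2, h3⟩ := ih V rest (by omega)
          (fun v hv y hstep => by
            rcases hinv v hv y hstep with h | h
            · exact Or.inl h
            · rcases List.mem_cons.1 h with rfl | h
              · exact Or.inl hmem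
              · exact Or.inr h)
          (fun q hqm => hq q (List.mem_cons_of_mem _ hqm))
        refine ⟨h1, fun q hqm => ?_, h3⟩
        rcases List.mem_cons.1 hqm with rfl | h
        · exact h1 _ hmem
        · exact h2 _ h
      · rw [pvBfsA, if_neg hc]
        have hcV : c ∉ V := fun h => hc ((PySem.Set.contains_iff _ _).2 h)
        have hcU : c ∈ pvUniv changed_module graph := hq c (List.mem_cons_self ..)
        have hVF : (PySem.Set.add V c).toFinset = insert c V.toFinset := by
          rw [PySem.Set.add, if_neg hc]
          ext a; simp
        have hcmem : c ∈ pvUniv changed_module graph \ V.toFinset :=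
          Finset.mem_sdiff.2 ⟨hcU, fun h => hcV (List.mem_toFinset.1 h)⟩
        have hcard : (pvUniv changed_module graph \ (PySem.Set.add V c).toFinset).card + 1
            = (pvUniv changed_module graph \ V.toFinset).card := by
          rw [hVF, Finset.sdiff_insert, Finset.card_erase_of_mem hcmem]
          have hpos : 0 < (pvUniv changed_module graph \ V.toFinset).card :=
            Finset.card_pos.2 ⟨c, hcmem⟩
          omega
        have hlen : ((pvRev graph).getD c []).length
            ≤ (graph.map (fun md => md.2.length)).sum := len_adjA graph c
        have hlenf : ((rest ++ ((pvRev graph).getD c []).filter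
              (fun a => !(PySem.Set.contains (PySem.Set.add V c) a))).length)
            ≤ rest.length + (graph.map (fun md => md.2.length)).sum := by
          rw [List.length_append]
          have := List.length_filter_le
            (fun a => !(PySem.Set.contains (PySem.Set.add V c) a)) ((pvRev graph).getD c [])
          omega
        have hf' : (pvUniv changed_module graph \ (PySem.Set.add V c).toFinset).card *
              ((graph.map (fun md => md.2.length)).sum + 2)
            + (rest ++ ((pvRev graph).getD c []).filter
                (fun a => !(PySem.Set.contains (PySem.Set.add V c) a))).length ≤ f := by
          have hsm : ((pvUniv changed_module graph \ (PySem.Set.add V c).toFinset).card + 1) *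
                ((graph.map (fun md => md.2.length)).sum + 2)
              = (pvUniv changed_module graph \ (PySem.Set.add V c).toFinset).card *
                  ((graph.map (fun md => md.2.length)).sum + 2)
                + ((graph.map (fun md => md.2.length)).sum + 2) := Nat.succ_mul _ _
          rw [← hcard] at hf
          omega
        obtain ⟨h1, h2, h3⟩ := ih (PySem.Set.add V c) _ hf'
          (fun v hv y hstep => by
            rcases (PySem.Set.mem_add V c v).1 hv with hv | rfl
            · rcases hinv v hv y hstep with h | h
              · exact Or.inl ((PySem.Set.mem_add V c y).2 (Or.inl h))
              · rcases List.mem_cons.1 h with rfl | h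
                · exact Or.inl ((PySem.Set.mem_add V y y).2 (Or.inr rfl))
                · exact Or.inr (List.mem_append_left _ h)
            · by_cases hy : y ∈ PySem.Set.add V v
              · exact Or.inl hy
              · refine Or.inr (List.mem_append_right _ (List.mem_filter.2
                  ⟨(mem_adjA graph v y).2 hstep, ?_⟩))
                cases hyc : PySem.Set.contains (PySem.Set.add V v) y
                · rfl
                · exact absurd ((PySem.Set.contains_iff _ _).1 hyc) hy)
          (fun q hqm => by
            rcases List.mem_append.1 hqm with h | h
            · exact hq q (List.mem_cons_of_mem _ h)
            · exact pvStep_mem_univ ((mem_adjA graph c q).1 (List.mem_of_mem_filter h)) _)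
        refine ⟨fun v hv => h1 v ((PySem.Set.mem_add V c v).2 (Or.inl hv)),
          fun q hqm => ?_, h3⟩
        rcases List.mem_cons.1 hqm with rfl | h
        · exact h1 _ ((PySem.Set.mem_add V q q).2 (Or.inr rfl))
        · exact h2 _ (List.mem_append_left _ h)

lemma dfsB_complete (changed_module : String) (graph : List (String × List String)) :
    ∀ (f : Nat) (V : PySem.Set String) (Q : List String),
      (pvUniv changed_module graph \ V.toFinset).card * (graph.length + 2) + Q.length ≤ f →
      (∀ v ∈ V, ∀ y, pvStep graph v y → y ∈ V ∨ y ∈ Q) →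
      (∀ q ∈ Q, q ∈ pvUniv changed_module graph) →
      (∀ v ∈ V, v ∈ pvDfsB graph f V Q) ∧
      (∀ q ∈ Q, q ∈ pvDfsB graph f V Q) ∧
      (∀ v ∈ pvDfsB graph f V Q, ∀ y, pvStep graph v y → y ∈ pvDfsB graph f V Q) := by
  intro f
  induction f with
  | zero =>
    intro V Q hf hinv _
    cases Q with
    | nil =>
      refine ⟨fun v hv => hv, by simp, fun v hv y hstep => ?_⟩
      rcases hinv v hv y hstep with h | h
      · exact h
      · simp at h
    | cons s ss => simp only [List.length_cons] at hf; omega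
  | succ f ih =>
    intro V Q hf hinv hq
    cases Q with
    | nil =>
      refine ⟨fun v hv => hv, by simp, fun v hv y hstep => ?_⟩
      rcases hinv v hv y hstep with h | h
      · exact h
      · simp at h
    | cons s ss =>
      have hne : (s :: ss) ≠ [] := by simp
      have hsplit : (s :: ss).dropLast ++ [(s :: ss).getLast hne] = s :: ss :=
        List.dropLast_append_getLast hne
      have hlenQ : (s :: ss).length = (s :: ss).dropLast.length + 1 := by
        conv_lhs => rw [← hsplit]
        rw [List.length_append, List.length_cons, List.length_nil]
      have hmemQ : ∀ q, q ∈ (s :: ss) ↔ (q ∈ (s :: ss).dropLast ∨ q = (s :: ss).getLast hne) := by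
        intro q; conv_lhs => rw [← hsplit]
        simp
      rw [hlenQ] at hf
      by_cases hc : PySem.Set.contains V ((s :: ss).getLast (by simp)) = true
      · rw [pvDfsB, if_pos hc]
        have hmem : (s :: ss).getLast hne ∈ V := (PySem.Set.contains_iff _ _).1 hc
        obtain ⟨h1, h2, h3⟩ := ih V (s :: ss).dropLast (by omega)
          (fun v hv y hstep => by
            rcases hinv v hv y hstep with h | h
            · exact Or.inl h
            · rcases (hmemQ y).1 h with h | rfl
              · exact Or.inr h
              · exact Or.inl hmem)
          (fun q hqm => hq q ((hmemQ q).2 (Or.inl hqm)))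
        refine ⟨h1, fun q hqm => ?_, h3⟩
        rcases (hmemQ q).1 hqm with h | rfl
        · exact h2 _ h
        · exact h1 _ hmem
      · rw [pvDfsB, if_neg hc, pvPushB_eq]
        have hcV : (s :: ss).getLast hne ∉ V := fun h => hc ((PySem.Set.contains_iff _ _).2 h)
        have hcU : (s :: ss).getLast hne ∈ pvUniv changed_module graph :=
          hq _ ((hmemQ _).2 (Or.inr rfl))
        have hVF : (PySem.Set.add V ((s :: ss).getLast hne)).toFinset
            = insert ((s :: ss).getLast hne) V.toFinset := by
          rw [PySem.Set.add, if_neg hc]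
          ext a; simp
        have hcmem : (s :: ss).getLast hne ∈ pvUniv changed_module graph \ V.toFinset :=
          Finset.mem_sdiff.2 ⟨hcU, fun h => hcV (List.mem_toFinset.1 h)⟩
        have hcard : (pvUniv changed_module graph \
              (PySem.Set.add V ((s :: ss).getLast hne)).toFinset).card + 1
            = (pvUniv changed_module graph \ V.toFinset).card := by
          rw [hVF, Finset.sdiff_insert, Finset.card_erase_of_mem hcmem]
          have hpos : 0 < (pvUniv changed_module graph \ V.toFinset).card :=
            Finset.card_pos.2 ⟨_, hcmem⟩
          omega
        have hlenf : (((graph.filter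
              (fun md => md.2.contains ((s :: ss).getLast hne) &&
                !(PySem.Set.contains (PySem.Set.add V ((s :: ss).getLast hne)) md.1))).map
                  (fun md => md.1)).length) ≤ graph.length := len_pushB_part graph _ _
        have hf' : (pvUniv changed_module graph \
              (PySem.Set.add V ((s :: ss).getLast hne)).toFinset).card * (graph.length + 2)
            + ((s :: ss).dropLast ++ (graph.filter
              (fun md => md.2.contains ((s :: ss).getLast hne) &&
                !(PySem.Set.contains (PySem.Set.add V ((s :: ss).getLast hne)) md.1))).map
                  (fun md => md.1)).length ≤ f := by
          have hsm : ((pvUniv changed_module graph \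
                (PySem.Set.add V ((s :: ss).getLast hne)).toFinset).card + 1) * (graph.length + 2)
              = (pvUniv changed_module graph \
                  (PySem.Set.add V ((s :: ss).getLast hne)).toFinset).card * (graph.length + 2)
                + (graph.length + 2) := Nat.succ_mul _ _
          rw [← hcard] at hf
          rw [List.length_append]
          omega
        obtain ⟨h1, h2, h3⟩ := ih (PySem.Set.add V ((s :: ss).getLast hne)) _ hf'
          (fun v hv y hstep => by
            rcases (PySem.Set.mem_add V _ v).1 hv with hv | rfl
            · rcases hinv v hv y hstep with h | h
              · exact Or.inl ((PySem.Set.mem_add V _ y).2 (Or.inl h))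
              · rcases (hmemQ y).1 h with h | rfl
                · exact Or.inr (List.mem_append_left _ h)
                · exact Or.inl ((PySem.Set.mem_add V _ ((s :: ss).getLast hne)).2 (Or.inr rfl))
            · by_cases hy : y ∈ PySem.Set.add V ((s :: ss).getLast hne)
              · exact Or.inl hy
              · exact Or.inr (List.mem_append_right _
                  ((mem_pushB_part graph ((s :: ss).getLast hne) y (PySem.Set.add V ((s :: ss).getLast hne))).2 ⟨hstep, hy⟩)))
          (fun q hqm => by
            rcases List.mem_append.1 hqm with h | h
            · exact hq q ((hmemQ q).2 (Or.inl h))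
            · exact pvStep_mem_univ ((mem_pushB_part graph _ q _).1 h).1 _)
        refine ⟨fun v hv => h1 v ((PySem.Set.mem_add V _ v).2 (Or.inl hv)),
          fun q hqm => ?_, h3⟩
        rcases (hmemQ q).1 hqm with h | rfl
        · exact h2 _ (List.mem_append_left _ h)
        · exact h1 _ ((PySem.Set.mem_add V _ ((s :: ss).getLast hne)).2 (Or.inr rfl))

-- ---- nodup preservation ----

lemma bfsA_nodup (rg : PySem.Dict String (List String)) :
    ∀ (f : Nat) (V : PySem.Set String) (Q : List String),
      V.Nodup → (pvBfsA rg f V Q).Nodup := by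
  intro f
  induction f with
  | zero => intro V Q h; exact h
  | succ f ih =>
    intro V Q h
    cases Q with
    | nil => exact h
    | cons c rest =>
      by_cases hc : PySem.Set.contains V c = true
      · rw [pvBfsA, if_pos hc]; exact ih _ _ h
      · rw [pvBfsA, if_neg hc]; exact ih _ _ (PySem.Set.nodup_add V c h)

lemma dfsB_nodup (graph : List (String × List String)) :
    ∀ (f : Nat) (V : PySem.Set String) (Q : List String),
      V.Nodup → (pvDfsB graph f V Q).Nodup := by
  intro f
  induction f with
  | zero => intro V Q h; exact h
  | succ f ih =>
    intro V Q h
    cases Q with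
    | nil => exact h
    | cons s ss =>
      by_cases hc : PySem.Set.contains V ((s :: ss).getLast (by simp)) = true
      · rw [pvDfsB, if_pos hc]; exact ih _ _ h
      · rw [pvDfsB, if_neg hc]; exact ih _ _ (PySem.Set.nodup_add V _ h)

-- ---- characterization of the two visited sets ----

lemma bfsA_char (changed_module : String) (graph : List (String × List String)) (x : String) :
    x ∈ pvBfsA (pvRev graph)
        ((graph.length + 2) * ((graph.map (fun md => md.2.length)).sum + 2) + 2)
        PySem.Set.empty [changed_module] ↔
      Relation.ReflTransGen (pvStep graph) changed_module x := by
  have hf : (pvUniv changed_module graph \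
        (PySem.Set.empty : PySem.Set String).toFinset).card *
        ((graph.map (fun md => md.2.length)).sum + 2) + ([changed_module] : List String).length
      ≤ (graph.length + 2) * ((graph.map (fun md => md.2.length)).sum + 2) + 2 := by
    have hU : (pvUniv changed_module graph).card ≤ graph.length + 1 := by
      calc (pvUniv changed_module graph).card
          ≤ (graph.map Prod.fst).toFinset.card + 1 := Finset.card_insert_le _ _
        _ ≤ (graph.map Prod.fst).length + 1 :=
            Nat.add_le_add_right (List.toFinset_card_le _) 1
        _ = graph.length + 1 := by rw [List.length_map]
    have hE : (pvUniv changed_module graph \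
        (PySem.Set.empty : PySem.Set String).toFinset) = pvUniv changed_module graph := by
      simp [PySem.Set.empty]
    rw [hE]
    have hU2 : (pvUniv changed_module graph).card ≤ graph.length + 2 := by omega
    have hm := Nat.mul_le_mul_right ((graph.map (fun md => md.2.length)).sum + 2) hU2
    simp only [List.length_cons, List.length_nil]
    omega
  obtain ⟨h1, h2, h3⟩ := bfsA_complete changed_module graph _ PySem.Set.empty [changed_module]
    hf (by intro v hv; simp [PySem.Set.empty] at hv)
    (by intro q hq; rw [List.mem_singleton] at hq; subst hq; exact Finset.mem_insert_self _ _)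
  constructor
  · intro hx
    rcases bfsA_sound graph _ _ _ _ hx with h | ⟨q, hq, hr⟩
    · simp [PySem.Set.empty] at h
    · rw [List.mem_singleton] at hq; subst hq; exact hr
  · intro hr
    induction hr with
    | refl => exact h2 _ (List.mem_cons_self ..)
    | tail _ hstep ihh => exact h3 _ ihh _ hstep

lemma dfsB_char (changed_module : String) (graph : List (String × List String)) (x : String) :
    x ∈ pvDfsB graph ((graph.length + 2) * (graph.length + 2) + 2)
        PySem.Set.empty [changed_module] ↔
      Relation.ReflTransGen (pvStep graph) changed_module x := by
  have hf : (pvUniv changed_module graph \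
        (PySem.Set.empty : PySem.Set String).toFinset).card * (graph.length + 2)
        + ([changed_module] : List String).length
      ≤ (graph.length + 2) * (graph.length + 2) + 2 := by
    have hU : (pvUniv changed_module graph).card ≤ graph.length + 1 := by
      calc (pvUniv changed_module graph).card
          ≤ (graph.map Prod.fst).toFinset.card + 1 := Finset.card_insert_le _ _
        _ ≤ (graph.map Prod.fst).length + 1 :=
            Nat.add_le_add_right (List.toFinset_card_le _) 1
        _ = graph.length + 1 := by rw [List.length_map]
    have hE : (pvUniv changed_module graph \
        (PySem.Set.empty : PySem.Set String).toFinset) = pvUniv changed_module graph := by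
      simp [PySem.Set.empty]
    rw [hE]
    have hU2 : (pvUniv changed_module graph).card ≤ graph.length + 2 := by omega
    have hm := Nat.mul_le_mul_right (graph.length + 2) hU2
    simp only [List.length_cons, List.length_nil]
    omega
  obtain ⟨h1, h2, h3⟩ := dfsB_complete changed_module graph _ PySem.Set.empty [changed_module]
    hf (by intro v hv; simp [PySem.Set.empty] at hv)
    (by intro q hq; rw [List.mem_singleton] at hq; subst hq; exact Finset.mem_insert_self _ _)
  constructor
  · intro hx
    rcases dfsB_sound graph _ _ _ _ hx with h | ⟨q, hq, hr⟩
    · simp [PySem.Set.empty] at h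
    · rw [List.mem_singleton] at hq; subst hq; exact hr
  · intro hr
    induction hr with
    | refl => exact h2 _ (List.mem_cons_self ..)
    | tail _ hstep ihh => exact h3 _ ihh _ hstep

-- ===== VERDICT (by name: the statement is the Claim_ definition above) =====
theorem find_affected_modules_spec : Claim_equal_find_affected_modules := by
  intro changed_module graph _
  unfold Spec_find_affected_modules find_affected_modules find_affected_modules_alt
  set RA := pvBfsA (pvRev graph)
      ((graph.length + 2) * ((graph.map (fun md => md.2.length)).sum + 2) + 2)
      PySem.Set.empty [changed_module] with hRA
  set RB := pvDfsB graph ((graph.length + 2) * (graph.length + 2) + 2)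
      PySem.Set.empty [changed_module] with hRB
  have hAnd : (PySem.Set.discard RA changed_module).Nodup :=
    (bfsA_nodup _ _ _ _ List.nodup_nil).filter _
  have hBnd : (PySem.Set.discard RB changed_module).Nodup :=
    (dfsB_nodup _ _ _ _ List.nodup_nil).filter _
  have hperm : (PySem.Set.discard RB changed_module).Perm (PySem.Set.discard RA changed_module) := by
    rw [List.perm_ext_iff_of_nodup hBnd hAnd]
    intro a
    rw [PySem.Set.mem_discard, PySem.Set.mem_discard, hRA, hRB,
      bfsA_char, dfsB_char]
  have hpair : (PySem.List.sorted (PySem.Set.discard RB changed_module) (fun x => x)).Pairwise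
      (fun a b : String => a < b) := by
    have hle := PySem.List.sorted_pairwise (PySem.Set.discard RB changed_module) (fun x => x)
    have hnd : (PySem.List.sorted (PySem.Set.discard RB changed_module) (fun x => x)).Nodup :=
      ((PySem.List.sorted_perm _ _ _).nodup_iff).2 hBnd
    exact (hle.and hnd).imp (fun h => lt_of_le_of_ne h.1 h.2)
  exact PySem.List.sorted_eq_of_perm_of_pairwise_lt _ _ _
    ((PySem.List.sorted_perm _ _ _).trans hperm) hpair
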